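-- pv_equiv track=rewrite | github.com/sigproc/robotic_surgery | src/ros/tip2d_detection/src/tip2d_detection.py | count
-- ===== SOURCE A (Python) =====
-- def count(a):
--     results = []
--     count = []
--     final=[]
--     for x in a:
--         if x not in results and x!=(0,0):
--             results.append(x)
--             count.append(0)
--     for x in a:
--         for i in range(0,len(results)):
--             if x==results[i]:
--                 count[i]+=1
--     for i in range(0,len(results)):
--         if count[i]==max(count):
--             final.append(results[i])
--     return max(final)
-- ===== SOURCE B (Python) =====
-- def count(a):
--     counts = {}
--     for x in a:
--         if x != (0, 0):
--             counts[x] = counts.get(x, 0) + 1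
--     m = max(counts.values())
--     return max(k for k, v in counts.items() if v == m)
-- ===== Notes on version B (the rewrite author's own statement) =====
-- stated objective: faster
-- what changed: Replaces A's three list passes (membership-scan dedup, a nested index loop recounting every element against every distinct element, and a filter pass recomputing max(count) each iteration) with one dict-counter pass followed by a max over values and a max over the tying keys.
import Mathlib
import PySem

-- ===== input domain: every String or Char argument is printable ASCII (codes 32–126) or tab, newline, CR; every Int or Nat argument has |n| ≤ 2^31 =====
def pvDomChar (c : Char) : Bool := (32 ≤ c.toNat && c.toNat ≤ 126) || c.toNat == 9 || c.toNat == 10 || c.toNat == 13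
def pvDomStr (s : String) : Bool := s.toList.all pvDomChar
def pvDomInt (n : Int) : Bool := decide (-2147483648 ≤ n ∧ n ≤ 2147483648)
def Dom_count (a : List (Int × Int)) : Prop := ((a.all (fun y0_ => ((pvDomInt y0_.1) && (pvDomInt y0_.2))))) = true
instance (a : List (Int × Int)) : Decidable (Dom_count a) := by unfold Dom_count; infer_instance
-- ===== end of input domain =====

-- B replaces A's nested rescans with a single dict-counter pass; same return value on every input where A returns.

-- ===== PORT A =====
-- Port of A's three loops: dedup+zeros, nested index-count loop, filter by max(count), then max(final).
def count (a : List (Int × Int)) : Int × Int :=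
  let rc := a.foldl
    (fun (s : List (Int × Int) × List Int) x =>
      if x ∉ s.1 ∧ x ≠ ((0 : Int), (0 : Int)) then (s.1 ++ [x], s.2 ++ [(0 : Int)]) else s)
    ([], [])
  let results := rc.1
  let cnt := a.foldl
    (fun c x =>
      (PySem.List.pyRange 0 (results.length : Int) 1).foldl
        (fun c i =>
          if PySem.List.pyGet? results i = some x then
            PySem.List.pySetD c i (PySem.List.pyGetD c i 0 + 1)
          else c) c)
    rc.2
  let final := (PySem.List.pyRange 0 (results.length : Int) 1).foldl
    (fun f i =>
      if PySem.List.pyGet? cnt i = PySem.List.max? cnt (fun v => v) then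
        f ++ [PySem.List.pyGetD results i ((0 : Int), (0 : Int))]
      else f) []
  -- max(final) on tuples is Python's lexicographic max; raises on [] (excluded by Pre_)
  match PySem.List.max2? final Prod.fst Prod.snd with
  | some r => r
  | none => ((0 : Int), (0 : Int))

-- ===== PORT B =====
def count_alt (a : List (Int × Int)) : Int × Int :=
  let d := a.foldl
    (fun (d : PySem.Dict (Int × Int) Int) x =>
      if x ≠ ((0 : Int), (0 : Int)) then d.insert x (d.getD x 0 + 1) else d)
    PySem.Dict.empty
  -- m = max(counts.values()); raises on empty (excluded by Pre_)
  match PySem.List.max? d.values (fun v => v) with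
  | some m =>
    match PySem.List.max2? ((d.items.filter (fun p => p.2 == m)).map (fun p => p.1)) Prod.fst Prod.snd with
    | some r => r
    | none => ((0 : Int), (0 : Int))
  | none => ((0 : Int), (0 : Int))

-- ===== PRECONDITION & SPEC =====
-- Pre_ excludes exactly the inputs where Python A raises ValueError (max() of an empty sequence):
-- lists whose elements are all (0,0), including the empty list. B raises ValueError there too.
def Pre_count (a : List (Int × Int)) : Prop :=
  (a.filter (fun x => decide (x ≠ ((0 : Int), (0 : Int))))) ≠ []
instance (a : List (Int × Int)) : Decidable (Pre_count a) := by unfold Pre_count; infer_instance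

def pvWitness_count : (List (Int × Int)) := [(1, 2), (1, 2), (0, 0), (3, 1)]

def Spec_count (a : List (Int × Int)) (out : Int × Int) : Prop := out = count_alt a
instance (a : List (Int × Int)) (out : Int × Int) : Decidable (Spec_count a out) := by unfold Spec_count; infer_instance

-- ===== CLAIM (what is proved, stated in full; the proofs are below) =====
def Claim_equal_count : Prop := ∀ (a : List (Int × Int)), Dom_count a → Pre_count a → Spec_count a (count a)

-- ===== LEMMAS AND PROOFS =====

-- A's first loop: dedup of the non-(0,0) elements plus a parallel list of zeros.
lemma pv_build (l : List (Int × Int)) : ∀ (s : List (Int × Int)),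
    l.foldl
      (fun (s : List (Int × Int) × List Int) x =>
        if x ∉ s.1 ∧ x ≠ ((0 : Int), (0 : Int)) then (s.1 ++ [x], s.2 ++ [(0 : Int)]) else s)
      (s, List.replicate s.length 0)
    = (PySem.Set.update s (l.filter (fun x => decide (x ≠ ((0 : Int), (0 : Int))))),
       List.replicate (PySem.Set.update s (l.filter (fun x => decide (x ≠ ((0 : Int), (0 : Int)))))).length 0) := by
  induction l with
  | nil => intro s; simp [PySem.Set.update]
  | cons x l ih =>
    intro s
    simp only [List.foldl_cons, List.filter_cons]
    by_cases hx : x = ((0 : Int), (0 : Int))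
    · rw [if_neg (by simp [hx]), if_neg (by simp [hx])]
      exact ih s
    · by_cases hm : x ∈ s
      · rw [if_neg (by simp [hm]), if_pos (by simp [hx])]
        have hupd : PySem.Set.update s (x :: l.filter (fun x => decide (x ≠ ((0 : Int), (0 : Int)))))
            = PySem.Set.update s (l.filter (fun x => decide (x ≠ ((0 : Int), (0 : Int))))) := by
          simp [PySem.Set.update, PySem.Set.add_of_mem hm]
        rw [hupd]
        exact ih s
      · rw [if_pos ⟨hm, hx⟩, if_pos (by simp [hx])]
        have hrep : List.replicate s.length (0 : Int) ++ [(0 : Int)]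
            = List.replicate (s ++ [x]).length (0 : Int) := by
          simp [List.replicate_succ']
        rw [hrep]
        have hupd : PySem.Set.update s (x :: l.filter (fun x => decide (x ≠ ((0 : Int), (0 : Int)))))
            = PySem.Set.update (s ++ [x]) (l.filter (fun x => decide (x ≠ ((0 : Int), (0 : Int))))) := by
          simp [PySem.Set.update, PySem.Set.add_of_not_mem hm]
        rw [hupd]
        exact ih (s ++ [x])

-- A's inner counting loop over range(len(results)): pointwise increment where results[i] == x.
lemma pv_inner (R : List (Int × Int)) (x : Int × Int) (m : Nat) : ∀ (c : List Int),
    (PySem.List.pyRange 0 (m : Int) 1).foldl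
      (fun c i =>
        if PySem.List.pyGet? R i = some x then
          PySem.List.pySetD c i (PySem.List.pyGetD c i 0 + 1)
        else c) c
    = c.mapIdx (fun j v => if j < m ∧ R[j]? = some x then v + 1 else v) := by
  induction m with
  | zero =>
    intro c
    rw [PySem.List.pyRange_one_eq_nil (by norm_num)]
    simp only [List.foldl_nil]
    apply List.ext_getElem (by simp)
    intro i h1 h2
    simp [List.getElem_mapIdx]
  | succ m ih =>
    intro c
    have hcast : ((m + 1 : Nat) : Int) = (m : Int) + 1 := by push_cast; ring
    rw [hcast, PySem.List.pyRange_one_succ_right (by positivity), List.foldl_append, ih c]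
    simp only [List.foldl_cons, List.foldl_nil]
    have hlen : (c.mapIdx (fun j v => if j < m ∧ R[j]? = some x then v + 1 else v)).length = c.length := by
      simp
    by_cases hR : PySem.List.pyGet? R ((m : Nat) : Int) = some x
    · rw [if_pos hR]
      rw [PySem.List.pyGet?_natCast] at hR
      by_cases hmc : m < c.length
      · have hv : PySem.List.pyGetD (c.mapIdx (fun j v => if j < m ∧ R[j]? = some x then v + 1 else v)) ((m : Nat) : Int) 0
            = c.getD m 0 := by
          rw [PySem.List.pyGetD_natCast, List.getD_eq_getElem _ _ (by omega), List.getD_eq_getElem _ _ (by omega)]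
          simp only [List.getElem_mapIdx]
          rw [if_neg (by omega)]
        have hset : PySem.List.pySetD (c.mapIdx (fun j v => if j < m ∧ R[j]? = some x then v + 1 else v)) ((m : Nat) : Int) (c.getD m 0 + 1)
            = (c.mapIdx (fun j v => if j < m ∧ R[j]? = some x then v + 1 else v)).set m (c.getD m 0 + 1) := by
          simp only [PySem.List.pySetD]
          rw [PySem.List.pySet?_natCast _ _ _ (by omega)]
          rfl
        rw [hv, hset]
        apply List.ext_getElem (by simp)
        intro i hi1 hi2
        simp only [List.getElem_set, List.getElem_mapIdx]
        rcases eq_or_ne m i with rfl | hne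
        · rw [if_pos rfl, if_pos ⟨by omega, hR⟩, List.getD_eq_getElem _ _ (by omega)]
        · rw [if_neg hne]
          by_cases hi : i < m ∧ R[i]? = some x
          · rw [if_pos hi, if_pos ⟨by omega, hi.2⟩]
          · rw [if_neg hi, if_neg (by rintro ⟨h1, h2⟩; exact hi ⟨by omega, h2⟩)]
      · have hnone : PySem.List.pySet? (c.mapIdx (fun j v => if j < m ∧ R[j]? = some x then v + 1 else v)) ((m : Nat) : Int)
            (PySem.List.pyGetD (c.mapIdx (fun j v => if j < m ∧ R[j]? = some x then v + 1 else v)) ((m : Nat) : Int) 0 + 1) = none := by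
          rw [PySem.List.pySet?_eq_none_iff]
          simp only [hlen, PySem.Raise.InRange]
          omega
        simp only [PySem.List.pySetD, hnone, Option.getD_none]
        apply List.ext_getElem (by simp)
        intro i hi1 hi2
        simp only [List.getElem_mapIdx]
        by_cases hi : i < m ∧ R[i]? = some x
        · rw [if_pos hi, if_pos ⟨by omega, hi.2⟩]
        · have him : i < m := by
            simp only [List.length_mapIdx] at hi1
            omega
          rw [if_neg hi, if_neg (by rintro ⟨h1, h2⟩; exact hi ⟨him, h2⟩)]
    · rw [if_neg hR]
      rw [PySem.List.pyGet?_natCast] at hR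
      apply List.ext_getElem (by simp)
      intro i hi1 hi2
      simp only [List.getElem_mapIdx]
      by_cases hi : i < m ∧ R[i]? = some x
      · rw [if_pos hi, if_pos ⟨by omega, hi.2⟩]
      · have hi' : ¬(i < m + 1 ∧ R[i]? = some x) := by
          rintro ⟨h1, h2⟩
          rcases eq_or_ne i m with rfl | hne
          · exact hR h2
          · exact hi ⟨by omega, h2⟩
        rw [if_neg hi, if_neg hi']

lemma pv_outer (R : List (Int × Int)) (l : List (Int × Int)) : ∀ (c : List Int),
    l.foldl
      (fun c x =>
        (PySem.List.pyRange 0 (R.length : Int) 1).foldl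
          (fun c i =>
            if PySem.List.pyGet? R i = some x then
              PySem.List.pySetD c i (PySem.List.pyGetD c i 0 + 1)
            else c) c) c
    = c.mapIdx (fun j v => v + (R[j]?.elim 0 (fun r => (l.count r : Int)))) := by
  induction l with
  | nil =>
    intro c
    simp only [List.foldl_nil]
    apply List.ext_getElem (by simp)
    intro i h1 h2
    simp only [List.getElem_mapIdx]
    cases h : R[i]? <;> simp
  | cons x l ih =>
    intro c
    simp only [List.foldl_cons]
    rw [pv_inner R x R.length c, ih, List.mapIdx_mapIdx]
    apply List.ext_getElem (by simp)
    intro i h1 h2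
    simp only [List.getElem_mapIdx, Function.comp_apply]
    cases h : R[i]? with
    | none =>
      rw [if_neg (by rintro ⟨_, h2'⟩; simp at h2')]
      simp
    | some r =>
      obtain ⟨hilt, -⟩ := List.getElem?_eq_some_iff.mp h
      by_cases hrx : r = x
      · subst hrx
        rw [if_pos ⟨hilt, rfl⟩]
        simp only [Option.elim_some, List.count_cons, beq_self_eq_true, if_true]
        push_cast
        ring
      · rw [if_neg (by rintro ⟨_, h2'⟩; exact hrx (Option.some_injective _ h2'))]
        simp only [Option.elim_some, List.count_cons]
        rw [if_neg (by simp [beq_iff_eq]; exact fun hh => hrx hh.symm)]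
        push_cast
        ring

lemma pv_cnt (R : List (Int × Int)) (l : List (Int × Int)) :
    l.foldl
      (fun c x =>
        (PySem.List.pyRange 0 (R.length : Int) 1).foldl
          (fun c i =>
            if PySem.List.pyGet? R i = some x then
              PySem.List.pySetD c i (PySem.List.pyGetD c i 0 + 1)
            else c) c) (List.replicate R.length 0)
    = R.map (fun r => (l.count r : Int)) := by
  rw [pv_outer]
  apply List.ext_getElem (by simp)
  intro i h1 h2
  have hi : i < R.length := by simpa using h1
  simp only [List.getElem_mapIdx, List.getElem_replicate, List.getElem_map,
    List.getElem?_eq_getElem hi, Option.elim_some]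
  ring

lemma pv_final (R : List (Int × Int)) (mu : (Int × Int) → Int) (m : Nat) : m ≤ R.length →
    (PySem.List.pyRange 0 (m : Int) 1).foldl
      (fun f i =>
        if PySem.List.pyGet? (R.map mu) i = PySem.List.max? (R.map mu) (fun v => v) then
          f ++ [PySem.List.pyGetD R i ((0 : Int), (0 : Int))]
        else f) []
    = (R.take m).filter
        (fun r => decide (some (mu r) = PySem.List.max? (R.map mu) (fun v => v))) := by
  induction m with
  | zero =>
    intro _
    rw [PySem.List.pyRange_one_eq_nil (by norm_num)]
    simp
  | succ m ih =>
    intro hm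
    have hm' : m ≤ R.length := by omega
    have hmR : m < R.length := by omega
    have hcast : ((m + 1 : Nat) : Int) = (m : Int) + 1 := by push_cast; ring
    rw [hcast, PySem.List.pyRange_one_succ_right (by positivity), List.foldl_append, ih hm']
    simp only [List.foldl_cons, List.foldl_nil]
    have hget : PySem.List.pyGet? (R.map mu) ((m : Nat) : Int) = some (mu (R[m]'hmR)) := by
      rw [PySem.List.pyGet?_natCast]
      rw [List.getElem?_eq_getElem (by simpa using hmR)]
      simp
    have hgetD : PySem.List.pyGetD R ((m : Nat) : Int) ((0 : Int), (0 : Int)) = R[m]'hmR := by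
      rw [PySem.List.pyGetD_natCast, List.getD_eq_getElem _ _ hmR]
    rw [List.take_add_one, List.getElem?_eq_getElem hmR]
    simp only [Option.toList_some, List.filter_append, List.filter_cons, List.filter_nil]
    rw [hget, hgetD]
    by_cases hcond : some (mu (R[m]'hmR)) = PySem.List.max? (R.map mu) (fun v => v)
    · rw [if_pos hcond, decide_eq_true hcond]
      simp
    · rw [if_neg hcond, decide_eq_false hcond]
      simp

lemma pv_core (a : List (Int × Int)) (hpre : Pre_count a) : count a = count_alt a := by
  unfold Pre_count at hpre
  have hb := pv_build a []
  simp only [List.length_nil, List.replicate_zero, PySem.Set.update_nil_left] at hb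
  -- names
  set F := a.filter (fun x => decide (x ≠ ((0 : Int), (0 : Int)))) with hF
  set R := PySem.Set.ofList F with hR
  -- R nonempty
  obtain ⟨x0, hx0⟩ := List.exists_mem_of_ne_nil _ hpre
  have hx0R : x0 ∈ R := by rw [hR]; exact (PySem.Set.mem_ofList _ _).mpr hx0
  have hRne : R ≠ [] := List.ne_nil_of_mem hx0R
  -- max of the multiplicities exists
  have hmapne : R.map (fun r => (a.count r : Int)) ≠ [] := by simp [hRne]
  obtain ⟨M, hM⟩ : ∃ M, PySem.List.max? (R.map (fun r => (a.count r : Int))) (fun v => v) = some M := by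
    cases h : PySem.List.max? (R.map (fun r => (a.count r : Int))) (fun v => v) with
    | none => exact absurd ((PySem.List.max?_eq_none_iff _ _).mp h) hmapne
    | some M => exact ⟨M, rfl⟩
  -- count per element in F equals count in a, for members of R
  have hcntF : ∀ k ∈ R, ((F.count k : Nat) : Int) = ((a.count k : Nat) : Int) := by
    intro k hk
    rw [hR] at hk
    have hkF : k ∈ F := (PySem.Set.mem_ofList _ _).mp hk
    have hp : (fun x => decide (x ≠ ((0 : Int), (0 : Int)))) k = true := (List.mem_filter.mp hkF).2
    have hcf := List.count_filter (p := fun x => decide (x ≠ ((0 : Int), (0 : Int)))) (a := k) (l := a) hp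
    rw [hF]
    exact congrArg (Nat.cast : Nat → Int) hcf
  -- A side
  have hA : count a =
      match PySem.List.max2? (R.filter (fun r => decide (some ((a.count r : Nat) : Int) = some M)))
        Prod.fst Prod.snd with
      | some r => r
      | none => ((0 : Int), (0 : Int)) := by
    simp only [count, hb, pv_cnt R a]
    rw [pv_final R (fun r => (a.count r : Int)) R.length le_rfl, List.take_length]
    simp only [hM]
  -- B side
  have hBd : a.foldl
      (fun (d : PySem.Dict (Int × Int) Int) x =>
        if x ≠ ((0 : Int), (0 : Int)) then d.insert x (d.getD x 0 + 1) else d)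
      PySem.Dict.empty = PySem.Dict.counter F := by
    rw [PySem.List.foldl_ite_eq_foldl_filter (p := fun x => x ≠ ((0 : Int), (0 : Int)))
      (f := fun (d : PySem.Dict (Int × Int) Int) x => d.insert x (d.getD x 0 + 1)),
      PySem.Dict.foldl_insert_getD_add_one_eq_counter]
  have hvals : (PySem.Dict.counter F).values = R.map (fun r => (a.count r : Int)) := by
    have h1 : (PySem.Dict.counter F).values = (PySem.Dict.counter F).items.map Prod.snd := rfl
    rw [h1, PySem.Dict.items_counter, List.map_map]
    exact List.map_congr_left (fun k hk => hcntF k hk)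
  have hitems : (((PySem.Dict.counter F).items.filter (fun p => p.2 == M)).map (fun p => p.1))
      = R.filter (fun r => decide (some ((a.count r : Nat) : Int) = some M)) := by
    rw [PySem.Dict.items_counter, List.filter_map, List.map_map]
    have hid : ((fun p : (Int × Int) × Int => p.1) ∘ (fun k => (k, ((F.count k : Nat) : Int)))) = id := rfl
    rw [hid, List.map_id]
    apply List.filter_congr
    intro k hk
    rw [Function.comp]
    simp only [hcntF k hk, Option.some.injEq]
    apply Bool.eq_iff_iff.mpr
    simp
  have hB : count_alt a =
      match PySem.List.max2? (R.filter (fun r => decide (some ((a.count r : Nat) : Int) = some M)))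
        Prod.fst Prod.snd with
      | some r => r
      | none => ((0 : Int), (0 : Int)) := by
    simp only [count_alt, hBd, hvals, hM, hitems]
  rw [hA, hB]

-- ===== VERDICT (by name: the statement is the Claim_ definition above) =====
theorem count_spec : Claim_equal_count := by
  intro a _ hpre
  unfold Spec_count
  exact pv_core a hpre
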